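-- pv_equiv track=rewrite | github.com/git4lhe/lhe-algorithm | Greedy/단속카메라.py | solution
-- ===== SOURCE A (Python) =====
-- def solution(routes):
--
--     answer = 0
--     routes = sorted(routes, key= lambda x: x[0])
--
--     cctv = [0] * len(routes)
--     for i in range(0, len(routes)):
--         if not cctv[i]:
--             answer += 1
--             cctv[i] = True
--             exit = routes[i][1]
--             for j in range(i+1,len(routes)):
--                 if routes[j][0] <= exit:
--                     cctv[j] = True
--                     if routes[j][1] >= exit:
--                         continue
--                     else:
--                         exit = routes[j][1]
--                 else:
--                     break
--     return answer
-- ===== SOURCE B (Python) =====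
-- def solution(routes):
--     count = 0
--     reach = None
--     for route in sorted(routes, key=lambda r: r[0]):
--         start, end = route[0], route[1]
--         if reach is None or start > reach:
--             count += 1
--             reach = end
--         elif end < reach:
--             reach = end
--     return count
-- ===== Notes on version B (the rewrite author's own statement) =====
-- stated objective: simpler
-- what changed: Replaces A's boolean cctv marking array and nested index loops (outer scan over unmarked routes + inner marking loop with break) by a single fold over the start-sorted list carrying only a counter and the current block's minimum exit, counting a new camera whenever a route's start exceeds that reach.
import Mathlib
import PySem

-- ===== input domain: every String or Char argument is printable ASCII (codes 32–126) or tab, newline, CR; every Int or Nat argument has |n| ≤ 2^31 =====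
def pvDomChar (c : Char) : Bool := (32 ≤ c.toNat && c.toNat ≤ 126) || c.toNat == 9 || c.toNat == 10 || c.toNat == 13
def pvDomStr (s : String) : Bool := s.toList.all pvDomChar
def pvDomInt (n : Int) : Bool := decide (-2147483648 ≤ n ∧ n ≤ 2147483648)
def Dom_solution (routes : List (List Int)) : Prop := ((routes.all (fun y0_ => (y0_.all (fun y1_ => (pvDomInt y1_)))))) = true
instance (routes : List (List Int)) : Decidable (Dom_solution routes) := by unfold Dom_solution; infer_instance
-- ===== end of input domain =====

-- B replaces A's cctv marking array and nested loops by a single fold (count, current reach)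
-- over the same start-sorted list; objective: simpler.

-- ===== PORT A =====
-- inner loop: `for j in range(i+1, len(routes)): …` with `break`; state (cctv, exit)
def solutionInner (rs : List (List Int)) (n : Nat) (j : Nat) (cctv : List Bool) (exit_ : Int) :
    List Bool × Int :=
  if _h : j < n then
    if PySem.List.pyGetD (PySem.List.pyGetD rs (j : Int) []) 0 0 ≤ exit_ then
      -- cctv[j] = True, then continue or shrink exit
      if PySem.List.pyGetD (PySem.List.pyGetD rs (j : Int) []) 1 0 ≥ exit_ then
        solutionInner rs n (j + 1) (PySem.List.pySetD cctv (j : Int) true) exit_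
      else
        solutionInner rs n (j + 1) (PySem.List.pySetD cctv (j : Int) true)
          (PySem.List.pyGetD (PySem.List.pyGetD rs (j : Int) []) 1 0)
    else (cctv, exit_)  -- break
  else (cctv, exit_)
termination_by n - j

-- outer loop: `for i in range(0, len(routes)): …`; state (answer, cctv)
def solutionOuter (rs : List (List Int)) (n : Nat) (i : Nat) (answer : Int) (cctv : List Bool) :
    Int :=
  if _h : i < n then
    if PySem.List.pyGetD cctv (i : Int) false = false then
      solutionOuter rs n (i + 1) (answer + 1)
        (solutionInner rs n (i + 1) (PySem.List.pySetD cctv (i : Int) true)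
          (PySem.List.pyGetD (PySem.List.pyGetD rs (i : Int) []) 1 0)).1
    else
      solutionOuter rs n (i + 1) answer cctv
  else answer
termination_by n - i

def solution (routes : List (List Int)) : Int :=
  let rs := PySem.List.sorted routes (fun x => PySem.List.pyGetD x 0 0)
  solutionOuter rs rs.length 0 0 (List.replicate rs.length false)

-- ===== PORT B =====
def solutionAltStep (st : Int × Option Int) (route : List Int) : Int × Option Int :=
  match st with
  | (count, none) => (count + 1, some (PySem.List.pyGetD route 1 0))
  | (count, some reach) =>
    if PySem.List.pyGetD route 0 0 > reach then (count + 1, some (PySem.List.pyGetD route 1 0))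
    else if PySem.List.pyGetD route 1 0 < reach then (count, some (PySem.List.pyGetD route 1 0))
    else (count, some reach)

def solution_alt (routes : List (List Int)) : Int :=
  ((PySem.List.sorted routes (fun r => PySem.List.pyGetD r 0 0)).foldl
    solutionAltStep ((0 : Int), (none : Option Int))).1

-- ===== PRECONDITION & SPEC =====
-- Pre_ excludes exactly the inputs on which Python A raises IndexError: some route has
-- fewer than two entries (routes[i][1] / key x[0]).
def Pre_solution (routes : List (List Int)) : Prop :=
  ∀ r ∈ routes, 2 ≤ r.length
instance (routes : List (List Int)) : Decidable (Pre_solution routes) := by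
  unfold Pre_solution; infer_instance

def pvWitness_solution : List (List Int) := [[1, 5], [3, 9], [7, 8]]

def Spec_solution (routes : List (List Int)) (out : Int) : Prop := out = solution_alt routes
instance (routes : List (List Int)) (out : Int) : Decidable (Spec_solution routes out) := by
  unfold Spec_solution; infer_instance

-- ===== CLAIM (what is proved, stated in full; the proofs are below) =====
def Claim_equal_solution : Prop :=
  ∀ (routes : List (List Int)), Dom_solution routes → Pre_solution routes →
    Spec_solution routes (solution routes)

-- ===== LEMMAS AND PROOFS =====

-- how many leading routes the inner loop consumes, and the final exit it reaches
def skipSpec : List (List Int) → Int → Nat × Int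
  | [], e => (0, e)
  | r :: t, e =>
    if PySem.List.pyGetD r 0 0 ≤ e then
      ((skipSpec t (if PySem.List.pyGetD r 1 0 ≥ e then e else PySem.List.pyGetD r 1 0)).1 + 1,
       (skipSpec t (if PySem.List.pyGetD r 1 0 ≥ e then e else PySem.List.pyGetD r 1 0)).2)
    else (0, e)

-- the block count A computes on the sorted list
def blocksSpec : List (List Int) → Int
  | [] => 0
  | r :: t =>
    1 + blocksSpec (t.drop (skipSpec t (PySem.List.pyGetD r 1 0)).1)
termination_by l => l.length
decreasing_by
  simp only [List.length_drop, List.length_cons]; omega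

-- B's fold state after the first route, as a two-argument recursion
def gSpec : List (List Int) → Int → Int
  | [], _ => 0
  | r :: t, reach =>
    if PySem.List.pyGetD r 0 0 > reach then 1 + gSpec t (PySem.List.pyGetD r 1 0)
    else if PySem.List.pyGetD r 1 0 < reach then gSpec t (PySem.List.pyGetD r 1 0)
    else gSpec t reach

theorem foldB_some (t : List (List Int)) : ∀ (c : Int) (reach : Int),
    (t.foldl solutionAltStep (c, some reach)).1 = c + gSpec t reach := by
  induction t with
  | nil => intro c reach; simp [gSpec]
  | cons r t ih =>
    intro c reach
    simp only [List.foldl_cons, solutionAltStep, gSpec]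
    split_ifs with h1 h2
    · rw [ih]; ring
    · rw [ih]
    · rw [ih]

theorem gSpec_blocks (t : List (List Int)) : ∀ e : Int,
    gSpec t e = blocksSpec (t.drop (skipSpec t e).1) := by
  induction t with
  | nil => intro e; simp [gSpec, skipSpec, blocksSpec]
  | cons r t ih =>
    intro e
    simp only [gSpec, skipSpec]
    by_cases h0 : PySem.List.pyGetD r 0 0 ≤ e
    · have hng : ¬ PySem.List.pyGetD r 0 0 > e := by omega
      simp only [h0, hng, if_true, if_false]
      by_cases h1 : PySem.List.pyGetD r 1 0 ≥ e
      · have : ¬ PySem.List.pyGetD r 1 0 < e := by omega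
        simp only [h1, this, if_true, if_false, List.drop_succ_cons]
        exact ih e
      · have : PySem.List.pyGetD r 1 0 < e := by omega
        simp only [h1, this, if_true, if_false, List.drop_succ_cons]
        exact ih _
    · have hg : PySem.List.pyGetD r 0 0 > e := by omega
      simp only [h0, hg, if_true, if_false, List.drop_zero, blocksSpec]
      rw [ih]

-- marking position j of a replicate-true prefix extends the prefix
theorem set_replicate_prefix (j m : Nat) (hm : 1 ≤ m) :
    PySem.List.pySetD (List.replicate j true ++ List.replicate m false) (j : Int) true
      = List.replicate (j + 1) true ++ List.replicate (m - 1) false := by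
  rw [PySem.List.pySetD_natCast]
  obtain ⟨m', rfl⟩ : ∃ m', m = m' + 1 := ⟨m - 1, by omega⟩
  have h1 : List.replicate (m' + 1) false = false :: List.replicate m' false := rfl
  rw [h1, List.set_append_right _ _ (by simp), List.length_replicate, Nat.sub_self,
    List.set_cons_zero]
  have h2 : List.replicate (j + 1) true = List.replicate j true ++ [true] := by
    rw [List.replicate_succ']
  rw [h2, List.append_assoc]
  simp

theorem pyGetD_replicate_prefix (k m i : Nat) (hik : i < k) :
    PySem.List.pyGetD (List.replicate k true ++ List.replicate m false) (i : Int) false = true := by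
  rw [PySem.List.pyGetD_natCast, List.getD_eq_getElem?_getD, List.getElem?_append_left (by simpa)]
  simp [hik]

theorem pyGetD_replicate_at (k m : Nat) (hm : 1 ≤ m) :
    PySem.List.pyGetD (List.replicate k true ++ List.replicate m false) (k : Int) false
      = false := by
  rw [PySem.List.pyGetD_natCast, List.getD_eq_getElem?_getD,
    List.getElem?_append_right (by simp), List.length_replicate, Nat.sub_self]
  obtain ⟨m', rfl⟩ : ∃ m', m = m' + 1 := ⟨m - 1, by omega⟩
  simp

theorem skipSpec_fst_le (t : List (List Int)) : ∀ e, (skipSpec t e).1 ≤ t.length := by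
  induction t with
  | nil => intro e; simp [skipSpec]
  | cons r t ih =>
    intro e
    simp only [skipSpec, List.length_cons]
    by_cases h : PySem.List.pyGetD r 0 0 ≤ e
    · rw [if_pos h]
      have := ih (if PySem.List.pyGetD r 1 0 ≥ e then e else PySem.List.pyGetD r 1 0)
      omega
    · rw [if_neg h]
      simp

theorem inner_spec (rs : List (List Int)) (n : Nat) (hn : n = rs.length) :
    ∀ fuel j (e : Int), n - j = fuel → j ≤ n →
    solutionInner rs n j (List.replicate j true ++ List.replicate (n - j) false) e
      = (List.replicate (j + (skipSpec (rs.drop j) e).1) true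
          ++ List.replicate (n - j - (skipSpec (rs.drop j) e).1) false,
         (skipSpec (rs.drop j) e).2) := by
  intro fuel
  induction fuel using Nat.strong_induction_on with
  | _ fuel ih =>
  intro j e hfuel hjn
  by_cases h : j < n
  · have hjlt : j < rs.length := by omega
    have hdrop : rs.drop j = rs[j] :: rs.drop (j + 1) := List.drop_eq_getElem_cons hjlt
    have hget : PySem.List.pyGetD rs (j : Int) [] = rs[j] := by
      rw [PySem.List.pyGetD_natCast, List.getD_eq_getElem?_getD, List.getElem?_eq_getElem hjlt]
      rfl
    rw [solutionInner, dif_pos h, hget]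
    have hset := set_replicate_prefix j (n - j) (by omega)
    have hstep : n - j - 1 = n - (j + 1) := by omega
    rw [hset, hstep] at *
    rw [hdrop]
    simp only [skipSpec]
    by_cases h0 : PySem.List.pyGetD rs[j] 0 0 ≤ e
    · by_cases h1 : PySem.List.pyGetD rs[j] 1 0 ≥ e
      · simp only [h0, h1, if_true]
        rw [ih (n - (j + 1)) (by omega) (j + 1) e rfl (by omega)]
        refine Prod.ext ?_ rfl
        have e1 : j + 1 + (skipSpec (rs.drop (j + 1)) e).1
            = j + ((skipSpec (rs.drop (j + 1)) e).1 + 1) := by omega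
        have e2 : n - (j + 1) - (skipSpec (rs.drop (j + 1)) e).1
            = n - j - ((skipSpec (rs.drop (j + 1)) e).1 + 1) := by omega
        rw [e1, e2]
      · simp only [h0, h1, if_true, if_false]
        rw [ih (n - (j + 1)) (by omega) (j + 1) (PySem.List.pyGetD rs[j] 1 0) rfl (by omega)]
        refine Prod.ext ?_ rfl
        have e1 : j + 1 + (skipSpec (rs.drop (j + 1)) (PySem.List.pyGetD rs[j] 1 0)).1
            = j + ((skipSpec (rs.drop (j + 1)) (PySem.List.pyGetD rs[j] 1 0)).1 + 1) := by omega
        have e2 : n - (j + 1) - (skipSpec (rs.drop (j + 1)) (PySem.List.pyGetD rs[j] 1 0)).1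
            = n - j - ((skipSpec (rs.drop (j + 1)) (PySem.List.pyGetD rs[j] 1 0)).1 + 1) := by omega
        rw [e1, e2]
    · simp only [h0, if_false]
      simp
  · have hjn' : j = n := by omega
    have hd : rs.drop j = [] := by apply List.drop_eq_nil_of_le; omega
    rw [solutionInner, dif_neg h, hd]
    simp [skipSpec, hjn']

theorem outer_spec (rs : List (List Int)) (n : Nat) (hn : n = rs.length) :
    ∀ fuel i k (answer : Int), n - i = fuel → i ≤ k → k ≤ n →
    solutionOuter rs n i answer (List.replicate k true ++ List.replicate (n - k) false)
      = answer + blocksSpec (rs.drop k) := by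
  intro fuel
  induction fuel using Nat.strong_induction_on with
  | _ fuel ih =>
  intro i k answer hfuel hik hkn
  by_cases h : i < n
  · rw [solutionOuter, dif_pos h]
    by_cases hik' : i < k
    · rw [pyGetD_replicate_prefix k (n - k) i hik']
      simp only [if_false, Bool.true_eq_false]
      exact ih (n - (i + 1)) (by omega) (i + 1) k answer rfl (by omega) hkn
    · have hkeq : k = i := by omega
      subst hkeq
      rw [pyGetD_replicate_at k (n - k) (by omega)]
      simp only [if_true]
      rw [set_replicate_prefix k (n - k) (by omega)]
      have hstep : n - k - 1 = n - (k + 1) := by omega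
      rw [hstep, inner_spec rs n hn (n - (k + 1)) (k + 1) _ rfl (by omega)]
      set e := PySem.List.pyGetD (PySem.List.pyGetD rs (k : Int) []) 1 0 with he
      set c := (skipSpec (rs.drop (k + 1)) e).1 with hc
      have hcle : c ≤ n - (k + 1) := by
        have := skipSpec_fst_le (rs.drop (k + 1)) e
        simp only [List.length_drop] at this
        omega
      have hrw : n - (k + 1) - c = n - (k + 1 + c) := by omega
      rw [hrw]
      rw [ih (n - (k + 1)) (by omega) (k + 1) (k + 1 + c) (answer + 1) rfl (by omega) (by omega)]
      have hklt : k < rs.length := by omega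
      have hdrop : rs.drop k = rs[k] :: rs.drop (k + 1) := List.drop_eq_getElem_cons hklt
      have hget : PySem.List.pyGetD rs (k : Int) [] = rs[k] := by
        rw [PySem.List.pyGetD_natCast, List.getD_eq_getElem?_getD, List.getElem?_eq_getElem hklt]
        rfl
      rw [hdrop, blocksSpec]
      rw [he, hget] at hc
      rw [← List.drop_drop, hc]
      ring
  · have hin : i = n := by omega
    have hkeq : k = n := by omega
    have hd : rs.drop k = [] := by apply List.drop_eq_nil_of_le; omega
    rw [solutionOuter, dif_neg h, hd]
    simp [blocksSpec]

theorem foldB_eq_blocks (rs : List (List Int)) :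
    (rs.foldl solutionAltStep ((0 : Int), (none : Option Int))).1 = blocksSpec rs := by
  cases rs with
  | nil => simp [blocksSpec]
  | cons r t =>
    simp only [List.foldl_cons, solutionAltStep, blocksSpec]
    rw [foldB_some, gSpec_blocks]
    ring

-- ===== VERDICT (by name: the statement is the Claim_ definition above) =====
theorem solution_spec : Claim_equal_solution := by
  intro routes _hdom _hpre
  unfold Spec_solution
  show solutionOuter (PySem.List.sorted routes (fun x => PySem.List.pyGetD x 0 0))
      (PySem.List.sorted routes (fun x => PySem.List.pyGetD x 0 0)).length 0 0
      (List.replicate (PySem.List.sorted routes (fun x => PySem.List.pyGetD x 0 0)).length false)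
    = solution_alt routes
  set rs := PySem.List.sorted routes (fun x => PySem.List.pyGetD x 0 0) with hrs
  have h0 : List.replicate rs.length false
      = List.replicate 0 true ++ List.replicate (rs.length - 0) false := by simp
  rw [h0, outer_spec rs rs.length rfl (rs.length - 0) 0 0 0 rfl (by omega) (by omega)]
  unfold solution_alt
  rw [← hrs, foldB_eq_blocks]
  simp
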